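-- pv_equiv track=rewrite | github.com/YoavMayer/podcast-intel | src/podcast_intel/transcription/mock_transcribe.py | _find_filler_words_in_text
-- ===== SOURCE A (Python) =====
-- from typing import List, Dict, Any, Optional, Tuple
--
-- FILLER_WORDS_ALL = [
--     "um", "uh", "like", "you know", "I mean", "basically",
--     "right?", "so", "well", "okay", "actually",
-- ]
--
-- def _find_filler_words_in_text(
--     text: str,
-- ) -> List[Tuple[str, int]]:
--     """
--     Scan text for known filler words and return their positions.
--
--     Args:
--         text: Segment text to scan
--
--     Returns:
--         List of (filler_text, character_offset) tuples
--     """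
--     found = []
--     for filler in FILLER_WORDS_ALL:
--         start = 0
--         while True:
--             idx = text.find(filler, start)
--             if idx == -1:
--                 break
--             # Verify it appears as a standalone token (preceded/followed by
--             # space, comma, or string boundary)
--             before_ok = (idx == 0) or (text[idx - 1] in " ,.")
--             after_end = idx + len(filler)
--             after_ok = (after_end >= len(text)) or (text[after_end] in " ,.")
--             if before_ok and after_ok:
--                 found.append((filler, idx))
--             start = idx + len(filler)
--     return found
-- ===== SOURCE B (Python) =====
-- from typing import List, Tuple
--
-- FILLER_WORDS_ALL = [
--     "um", "uh", "like", "you know", "I mean", "basically",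
--     "right?", "so", "well", "okay", "actually",
-- ]
--
-- def _find_filler_words_in_text(
--     text: str,
-- ) -> List[Tuple[str, int]]:
--     """One left-to-right pass over character positions collecting standalone
--     filler matches in encounter order, then regrouped per filler."""
--     n = len(text)
--     boundary = " ,."
--     hits = []  # (filler, offset) in position order
--     for i in range(n):
--         for filler in FILLER_WORDS_ALL:
--             if text.startswith(filler, i):
--                 j = i + len(filler)
--                 if (i == 0 or text[i - 1] in boundary) and (j >= n or text[j] in boundary):
--                     hits.append((filler, i))
--     result = []
--     for filler in FILLER_WORDS_ALL:
--         for f, off in hits: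
--             if f == filler:
--                 result.append((f, off))
--     return result
-- ===== Notes on version B (the rewrite author's own statement) =====
-- stated objective: alternative
-- what changed: Inverts the loop nest: one left-to-right pass over character positions (checking each filler for a standalone match via startswith and the ' ,.' boundary rule) collects flat (filler, offset) hits, then a regrouping pass emits them per filler in FILLER_WORDS_ALL order, instead of A's per-filler repeated str.find scans with skip-by-length restarts.
import Mathlib
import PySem

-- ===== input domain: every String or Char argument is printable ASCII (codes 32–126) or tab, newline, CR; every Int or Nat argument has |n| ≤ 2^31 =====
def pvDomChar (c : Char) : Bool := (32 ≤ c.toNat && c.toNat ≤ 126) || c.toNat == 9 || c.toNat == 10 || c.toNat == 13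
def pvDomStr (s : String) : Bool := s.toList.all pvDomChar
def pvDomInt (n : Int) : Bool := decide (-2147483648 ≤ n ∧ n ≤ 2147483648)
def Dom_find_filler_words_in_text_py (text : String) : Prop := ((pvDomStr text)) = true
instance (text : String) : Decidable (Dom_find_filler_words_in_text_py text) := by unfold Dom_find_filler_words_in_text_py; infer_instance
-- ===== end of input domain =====

-- B inverts A's loop nest: one pass over character positions collecting flat (filler, offset)
-- hits, then a regrouping pass per filler — an alternative decomposition, same exact output.


-- module constant FILLER_WORDS_ALL (shared by both sources)
def pvFillers : List String :=
  ["um", "uh", "like", "you know", "I mean", "basically",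
   "right?", "so", "well", "okay", "actually"]

-- `c in " ,."` (both sources use this membership test on single characters)
def pvIsBnd (c : Char) : Bool := c == ' ' || c == ',' || c == '.'

-- the standalone-token check both sources perform at a match position i of a filler of length m:
-- (i == 0 or text[i-1] in " ,.") and (i + m >= len(text) or text[i+m] in " ,.")
-- (t.getD is used where the Python indexing is guaranteed in range by the short-circuit guard)
def pvBoundaryOk (t : List Char) (i m : Nat) : Bool :=
  (i == 0 || pvIsBnd (t.getD (i - 1) ' ')) &&
  (decide (t.length ≤ i + m) || pvIsBnd (t.getD (i + m) ' '))

-- ===== PORT A =====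
-- the `while True` find-loop of A for one filler (idx = text.find(filler, start); break on -1;
-- append on the boundary check; start = idx + len(filler)); fuel t.length + 1 suffices since
-- each iteration moves `start` up by at least len(filler) ≥ 1 from the found index
def pvFindLoop (t f : List Char) : Nat → Nat → List Nat
  | 0, _ => []
  | fuel + 1, start =>
    if PySem.Chars.findFrom t f (start : Int) = -1 then []
    else
      (if pvBoundaryOk t (PySem.Chars.findFrom t f (start : Int)).toNat f.length then
        [(PySem.Chars.findFrom t f (start : Int)).toNat] else []) ++
      pvFindLoop t f fuel ((PySem.Chars.findFrom t f (start : Int)).toNat + f.length)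

def find_filler_words_in_text_py (text : String) : List (String × Int) :=
  let t := text.toList
  pvFillers.flatMap (fun filler =>
    (pvFindLoop t filler.toList (t.length + 1) 0).map (fun (i : Nat) => (filler, (i : Int))))

-- ===== PORT B =====
-- text.startswith(filler, i) followed by the boundary check (Source B's inner test)
def pvOk (t f : List Char) (i : Nat) : Bool :=
  PySem.Chars.startswith (t.drop i) f && pvBoundaryOk t i f.length

def find_filler_words_in_text_py_alt (text : String) : List (String × Int) :=
  let t := text.toList
  let hits := (List.range t.length).flatMap (fun i =>
    (pvFillers.filter (fun filler => pvOk t filler.toList i)).map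
      (fun filler => (filler, (i : Int))))
  pvFillers.flatMap (fun filler => hits.filter (fun p => p.1 == filler))

-- ===== PRECONDITION & SPEC =====
def Spec_find_filler_words_in_text_py (text : String) (out : List (String × Int)) : Prop := out = find_filler_words_in_text_py_alt text
instance (text : String) (out : List (String × Int)) : Decidable (Spec_find_filler_words_in_text_py text out) := by unfold Spec_find_filler_words_in_text_py; infer_instance

-- ===== CLAIM (what is proved, stated in full; the proofs are below) =====
def Claim_equal_find_filler_words_in_text_py : Prop := ∀ (text : String), Dom_find_filler_words_in_text_py text → Spec_find_filler_words_in_text_py text (find_filler_words_in_text_py text)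

-- ===== LEMMAS AND PROOFS =====

-- no filler overlaps itself (no nontrivial border), so A's skip-by-length misses no match
def pvNoOvB (f : List Char) : Bool :=
  (List.range f.length).all fun d => d == 0 || !(f.drop d).isPrefixOf f

theorem pvNoOv_spec {f : List Char} (h : pvNoOvB f = true) {d : Nat}
    (hd0 : 0 < d) (hd : d < f.length) : ¬ f.drop d <+: f := by
  have h2 := List.all_eq_true.mp h d (List.mem_range.mpr hd)
  simp only [Bool.or_eq_true, beq_iff_eq, Bool.not_eq_true', ← Bool.not_eq_true,
    List.isPrefixOf_iff_prefix] at h2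
  rcases h2 with h3 | h3
  · omega
  · exact h3

-- two matches of a self-overlap-free pattern are at least its length apart
theorem pvSep {t f : List Char} (hno : pvNoOvB f = true) {i j : Nat} (hij : i < j)
    (h1 : f <+: t.drop i) (h2 : f <+: t.drop j) : i + f.length ≤ j := by
  by_contra hlt
  have hd : j - i < f.length := by omega
  have hd0 : 0 < j - i := by omega
  obtain ⟨r, hr⟩ := h1
  have hdropj : t.drop j = f.drop (j - i) ++ r := by
    have hjj : t.drop j = (t.drop i).drop (j - i) := by
      rw [List.drop_drop]; congr 1; omega
    rw [hjj, ← hr, List.drop_append_of_le_length (by omega)]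
  rw [hdropj] at h2
  obtain ⟨s, hs⟩ := h2
  have htake : (f.drop (j - i) ++ r).take (f.length - (j - i)) = f.drop (j - i) := by
    rw [List.take_append_of_le_length (by rw [List.length_drop])]
    exact List.take_of_length_le (by rw [List.length_drop])
  have htake2 : (f ++ s).take (f.length - (j - i)) = f.take (f.length - (j - i)) :=
    List.take_append_of_le_length (by omega)
  rw [← hs] at htake
  rw [htake2] at htake
  exact pvNoOv_spec hno hd0 hd (htake.symm ▸ List.take_prefix _ _)

def pvOkList (t f : List Char) (s : Nat) : List Nat :=
  (List.range' s (t.length - s)).filter (pvOk t f)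

theorem pvOk_true_of {t f : List Char} {i : Nat} (h : pvOk t f i = true) : f <+: t.drop i := by
  unfold pvOk at h
  have h1 : PySem.Chars.startswith (t.drop i) f = true := by
    cases hsw : PySem.Chars.startswith (t.drop i) f <;> simp [hsw] at h ⊢
  exact (PySem.Chars.startswith_iff _ _).mp h1

-- A's find-loop from `start` returns exactly the ok-positions ≥ start, in ascending order
theorem pvFindLoop_eq (t f : List Char) (hne : f ≠ []) (hno : pvNoOvB f = true) :
    ∀ fuel s, s ≤ t.length → t.length + 1 - s ≤ fuel →
      pvFindLoop t f fuel s = pvOkList t f s := by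
  intro fuel
  induction fuel with
  | zero => intro s hs hf; omega
  | succ fuel ih =>
    intro s hs hf
    unfold pvFindLoop
    by_cases hr : PySem.Chars.findFrom t f (s : Int) = -1
    · simp only [hr, if_true]
      have hninf := (PySem.Chars.findFrom_natCast_eq_neg_one_iff t f s hs).mp hr
      symm
      refine List.filter_eq_nil_iff.mpr ?_
      intro i hi hok
      have his : s ≤ i := (List.mem_range'_1.mp hi).1
      have hpre : f <+: (t.drop s).drop (i - s) := by
        have hdd : (t.drop s).drop (i - s) = t.drop i := by rw [List.drop_drop]; congr 1; omega
        rw [hdd]; exact pvOk_true_of hok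
      exact hninf (hpre.isInfix.trans (List.drop_suffix _ _).isInfix)
    · rw [if_neg hr]
      obtain ⟨hsi, hpre, hmin⟩ := PySem.Chars.findFrom_natCast_spec t f s hs hr
      set i0 := (PySem.Chars.findFrom t f (s : Int)).toNat with hi0
      have hsi0 : s ≤ i0 := by omega
      have hflen : 0 < f.length := List.length_pos_of_ne_nil hne
      have hfit : i0 + f.length ≤ t.length := by
        have hl := hpre.length_le
        simp only [List.length_drop] at hl
        omega
      rw [ih (i0 + f.length) (by omega) (by omega)]
      have hsplit : List.range' s (t.length - s) =
          List.range' s (i0 - s) ++ List.range' i0 f.length ++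
          List.range' (i0 + f.length) (t.length - (i0 + f.length)) := by
        rw [List.append_assoc]
        have h1 : List.range' i0 f.length ++
            List.range' (i0 + 1 * f.length) (t.length - (i0 + f.length)) 1
            = List.range' i0 (f.length + (t.length - (i0 + f.length))) := List.range'_append
        simp only [one_mul] at h1
        rw [h1]
        have h2 : List.range' s (i0 - s) ++
            List.range' (s + 1 * (i0 - s)) (f.length + (t.length - (i0 + f.length))) 1
            = List.range' s ((i0 - s) + (f.length + (t.length - (i0 + f.length)))) :=
          List.range'_append
        have hse : s + 1 * (i0 - s) = i0 := by omega
        rw [hse] at h2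
        rw [h2]
        congr 1
        omega
      unfold pvOkList
      rw [hsplit, List.filter_append, List.filter_append]
      have hseg1 : (List.range' s (i0 - s)).filter (pvOk t f) = [] := by
        refine List.filter_eq_nil_iff.mpr ?_
        intro i hi hok
        obtain ⟨h1, h2⟩ := List.mem_range'_1.mp hi
        exact hmin i h1 (by omega) (pvOk_true_of hok)
      have hseg2 : (List.range' i0 f.length).filter (pvOk t f) =
          if pvBoundaryOk t i0 f.length then [i0] else [] := by
        obtain ⟨m, hm⟩ := Nat.exists_eq_succ_of_ne_zero (Nat.pos_iff_ne_zero.mp hflen)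
        rw [show List.range' i0 f.length = i0 :: List.range' (i0 + 1) m from by
          rw [hm, List.range'_succ], List.filter_cons]
        have htail : (List.range' (i0 + 1) m).filter (pvOk t f) = [] := by
          refine List.filter_eq_nil_iff.mpr ?_
          intro i hi hok
          obtain ⟨h1, h2⟩ := List.mem_range'_1.mp hi
          have := pvSep hno (show i0 < i by omega) hpre (pvOk_true_of hok)
          omega
        have hok0 : pvOk t f i0 = (pvBoundaryOk t i0 f.length : Bool) := by
          unfold pvOk
          rw [(PySem.Chars.startswith_iff (t.drop i0) f).mpr hpre, Bool.true_and]
        rw [htail, hok0]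
      rw [hseg1, hseg2]
      simp

-- regrouping side: filtering a nodup list for one name
theorem pvFilterEq (c : String → Bool) (a : String) (l : List String)
    (h : l.Nodup) (ha : a ∈ l) :
    (l.filter c).filter (fun x => x == a) = if c a then [a] else [] := by
  induction l with
  | nil => cases ha
  | cons b l ih =>
    have hnotmem : ∀ x ∈ l.filter c, x ∈ l := fun x hx => (List.mem_filter.mp hx).1
    by_cases hba : b = a
    · subst hba
      have hbl : b ∉ l := (List.nodup_cons.mp h).1
      have hrest : (l.filter c).filter (fun x => x == b) = [] := by
        refine List.filter_eq_nil_iff.mpr ?_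
        intro x hx hxa
        have hxb : x = b := by simpa using hxa
        exact hbl (hxb ▸ hnotmem x hx)
      by_cases hc : c b
      · rw [List.filter_cons, if_pos hc, List.filter_cons]
        simp [hc, hrest]
      · rw [List.filter_cons, if_neg hc]
        simp [hc, hrest]
    · have hal : a ∈ l := by
        cases List.mem_cons.mp ha with
        | inl h' => exact absurd h'.symm hba
        | inr h' => exact h'
      have ihl := ih (List.nodup_cons.mp h).2 hal
      by_cases hc : c b
      · rw [List.filter_cons, if_pos hc, List.filter_cons,
          if_neg (by simp [hba]), ihl]
      · rw [List.filter_cons, if_neg hc, ihl]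

theorem pvFlatMapIf {α β : Type} (xs : List α) (p : α → Bool) (q : α → β) :
    (xs.flatMap fun i => if p i then [q i] else []) = (xs.filter p).map q := by
  induction xs with
  | nil => rfl
  | cons x xs ih =>
    rw [List.flatMap_cons, List.filter_cons, ih]
    by_cases hx : p x <;> simp [hx]

theorem pvNodupFillers : pvFillers.Nodup := by decide

-- the regrouped hits for one filler are exactly its ok-positions in ascending order
theorem pvAltGroup (t : List Char) (filler : String) (hmem : filler ∈ pvFillers) :
    (((List.range t.length).flatMap (fun i =>
        (pvFillers.filter (fun g => pvOk t g.toList i)).map (fun g => (g, (i : Int))))).filter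
      (fun p => p.1 == filler)) =
    ((List.range t.length).filter (pvOk t filler.toList)).map
      (fun (i : Nat) => (filler, (i : Int))) := by
  rw [List.filter_flatMap]
  have hper : ∀ i : Nat,
      (((pvFillers.filter (fun g => pvOk t g.toList i)).map (fun g => (g, (i : Int)))).filter
        (fun p => p.1 == filler)) =
      (if pvOk t filler.toList i then [(filler, (i : Int))] else []) := by
    intro i
    rw [List.filter_map]
    have hcomp : ((fun p : String × Int => p.1 == filler) ∘ (fun g => (g, (i : Int)))) =
        (fun x => x == filler) := rfl
    rw [hcomp, pvFilterEq (fun g => pvOk t g.toList i) filler pvFillers pvNodupFillers hmem]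
    by_cases hc : pvOk t filler.toList i <;> simp [hc]
  rw [List.flatMap_congr (fun i _ => hper i)]
  exact pvFlatMapIf _ _ _

theorem pvFillerProps : ∀ f ∈ pvFillers, f.toList ≠ [] ∧ pvNoOvB f.toList = true := by decide

-- ===== VERDICT (by name: the statement is the Claim_ definition above) =====
theorem find_filler_words_in_text_py_spec : Claim_equal_find_filler_words_in_text_py := by
  intro text _
  unfold Spec_find_filler_words_in_text_py
  unfold find_filler_words_in_text_py find_filler_words_in_text_py_alt
  refine List.flatMap_congr ?_
  intro filler hmem
  obtain ⟨hne, hno⟩ := pvFillerProps filler hmem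
  rw [pvFindLoop_eq text.toList filler.toList hne hno (text.toList.length + 1) 0
    (by omega) (by omega)]
  rw [pvAltGroup text.toList filler hmem]
  unfold pvOkList
  rw [List.range_eq_range']
  simp
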